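-- pv_equiv track=rewrite | github.com/mkmkl93/ml-ca | data/transform_dataset.py | change_to_relative
-- ===== SOURCE A (Python) =====
-- def change_to_relative(row):
--     i = 1  # first dose_time index
--     last_time = 0
--     while i < len(row) - 1:
--         new_time = row[i] - last_time
--         last_time = row[i]
--         row[i] = new_time
--         i += 2
--     return row
-- ===== SOURCE B (Python) =====
-- def change_to_relative(row):
--     # Reverse-order in-place differences: row[i] -= row[i-2] directly,
--     # walking the odd indices downward so sources are still original values.
--     i = len(row) - 2
--     if i % 2 == 0:
--         i -= 1
--     while i >= 3:
--         row[i] -= row[i - 2]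
--         i -= 2
--     return row
-- ===== Notes on version B (the rewrite author's own statement) =====
-- stated objective: alternative
-- what changed: Replaces the forward scan with a running last_time accumulator by a reverse walk over the odd indices that computes each difference directly as row[i] -= row[i-2], needing no carried state (and skipping index 1, whose subtraction of 0 is a no-op).
import Mathlib
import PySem

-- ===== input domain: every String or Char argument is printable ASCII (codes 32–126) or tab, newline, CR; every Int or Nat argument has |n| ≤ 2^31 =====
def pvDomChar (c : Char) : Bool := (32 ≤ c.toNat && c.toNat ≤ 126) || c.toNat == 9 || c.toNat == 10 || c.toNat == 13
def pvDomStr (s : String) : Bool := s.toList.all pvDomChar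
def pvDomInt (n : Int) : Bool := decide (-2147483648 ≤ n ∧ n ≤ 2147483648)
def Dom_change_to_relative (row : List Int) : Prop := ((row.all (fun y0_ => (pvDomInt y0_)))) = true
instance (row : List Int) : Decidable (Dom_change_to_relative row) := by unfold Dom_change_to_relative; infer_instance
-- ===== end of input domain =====

-- B is an alternative decomposition: a reverse walk over the odd indices doing
-- row[i] -= row[i-2] directly, instead of A's forward scan carrying a last_time accumulator.
-- Both Pythons mutate `row` in place identically; the theorems are about the returned value.

-- ===== PORT A =====
-- A's while loop; the guard `i + 1 < row.length` is Python's `i < len(row) - 1`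
-- (equivalent over the naturals reached here); the index i is always in range there,
-- so `getD _ 0` is exactly Python's row[i].
def change_to_relative_aLoop (row : List Int) (i : Nat) (last : Int) : List Int :=
  if _h : i + 1 < row.length then
    let new_time := row.getD i 0 - last
    change_to_relative_aLoop (row.set i new_time) (i + 2) (row.getD i 0)
  else row
termination_by row.length - i
decreasing_by simp [List.length_set]; omega

def change_to_relative (row : List Int) : List Int :=
  change_to_relative_aLoop row 1 0

-- ===== PORT B =====
-- B's while loop; i counts down by 2 from the largest odd index ≤ len-2;
-- under the guard 3 ≤ i, i.toNat is exact and in range, so getD/set match Python's row[i].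
def change_to_relative_bLoop (row : List Int) (i : Int) : List Int :=
  if _h : 3 ≤ i then
    change_to_relative_bLoop
      (row.set i.toNat (row.getD i.toNat 0 - row.getD (i.toNat - 2) 0)) (i - 2)
  else row
termination_by i.toNat
decreasing_by omega

def change_to_relative_alt (row : List Int) : List Int :=
  let i0 : Int := (row.length : Int) - 2
  let i1 : Int := if PySem.Int.mod i0 2 == 0 then i0 - 1 else i0
  change_to_relative_bLoop row i1

-- ===== PRECONDITION & SPEC =====
def Spec_change_to_relative (row : List Int) (out : List Int) : Prop := out = change_to_relative_alt row
instance (row : List Int) (out : List Int) : Decidable (Spec_change_to_relative row out) := by unfold Spec_change_to_relative; infer_instance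

-- ===== CLAIM (what is proved, stated in full; the proofs are below) =====
def Claim_equal_change_to_relative : Prop := ∀ (row : List Int), Dom_change_to_relative row → Spec_change_to_relative row (change_to_relative row)

-- ===== LEMMAS AND PROOFS =====

theorem getD_set_ne (l : List Int) (i j : Nat) (v : Int) (h : i ≠ j) :
    (l.set i v).getD j 0 = l.getD j 0 := by
  rw [List.getD_eq_getElem?_getD, List.getElem?_set, if_neg h, ← List.getD_eq_getElem?_getD]

theorem getD_set_self (l : List Int) (i : Nat) (v : Int) (h : i < l.length) :
    (l.set i v).getD i 0 = v := by
  rw [List.getD_eq_getElem?_getD, List.getElem?_set, if_pos rfl, if_pos h]; rfl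

theorem aLoop_length (row : List Int) (i : Nat) (last : Int) :
    (change_to_relative_aLoop row i last).length = row.length := by
  fun_induction change_to_relative_aLoop row i last with
  | case1 row i last h nt ih => simpa [List.length_set] using ih
  | case2 => rfl

theorem bLoop_length (row : List Int) (i : Int) :
    (change_to_relative_bLoop row i).length = row.length := by
  fun_induction change_to_relative_bLoop row i with
  | case1 row i h ih => simpa [List.length_set] using ih
  | case2 => rfl

-- A's loop leaves position j alone unless j ≥ i with the right parity and j+1 < len;
-- there it subtracts `last` at the first processed index and the original row[j-2] after.
theorem aLoop_getD (row : List Int) (i : Nat) (last : Int) (j : Nat) (hj : j < row.length) :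
    (change_to_relative_aLoop row i last).getD j 0 =
      if i ≤ j ∧ (j - i) % 2 = 0 ∧ j + 1 < row.length then
        row.getD j 0 - (if j = i then last else row.getD (j - 2) 0)
      else row.getD j 0 := by
  fun_induction change_to_relative_aLoop row i last with
  | case1 row i last h nt ih =>
    rw [ih (by simpa using hj)]
    simp only [List.length_set]
    by_cases hji : j = i
    · subst hji
      rw [if_neg (by omega), getD_set_self _ _ _ (by omega),
        if_pos (show j ≤ j ∧ (j - j) % 2 = 0 ∧ j + 1 < row.length by omega), if_pos rfl]
    · by_cases hc : i + 2 ≤ j ∧ (j - (i + 2)) % 2 = 0 ∧ j + 1 < row.length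
      · rw [if_pos hc]
        by_cases hji2 : j = i + 2
        · rw [if_pos hji2, getD_set_ne _ _ _ _ (by omega),
            if_pos (show i ≤ j ∧ (j - i) % 2 = 0 ∧ j + 1 < row.length by omega), if_neg hji]
          subst hji2
          have h2 : i + 2 - 2 = i := by omega
          rw [h2]
        · rw [if_neg hji2, getD_set_ne _ _ _ _ (by omega), getD_set_ne _ _ _ _ (by omega),
            if_pos (show i ≤ j ∧ (j - i) % 2 = 0 ∧ j + 1 < row.length by omega), if_neg hji]
      · rw [if_neg hc, if_neg (show ¬(i ≤ j ∧ (j - i) % 2 = 0 ∧ j + 1 < row.length) by omega),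
          getD_set_ne _ _ _ _ (by omega)]
  | case2 row i last h =>
    rw [if_neg (by omega)]

-- B's countdown loop subtracts the ORIGINAL row[j-2] at exactly the positions
-- 3 ≤ j ≤ i of i's parity (sources are untouched because larger indices go first).
theorem bLoop_getD (row : List Int) (i : Int) (j : Nat) (hj : j < row.length) :
    (change_to_relative_bLoop row i).getD j 0 =
      if 3 ≤ (j : Int) ∧ (j : Int) ≤ i ∧ (i - (j : Int)) % 2 = 0 then
        row.getD j 0 - row.getD (j - 2) 0
      else row.getD j 0 := by
  fun_induction change_to_relative_bLoop row i with
  | case1 row i h ih =>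
    rw [ih (by simpa using hj)]
    by_cases hji : j = i.toNat
    · subst hji
      rw [if_neg (show ¬(3 ≤ (i.toNat : Int) ∧ (i.toNat : Int) ≤ i - 2 ∧ (i - 2 - (i.toNat : Int)) % 2 = 0) by omega),
        getD_set_self _ _ _ hj,
        if_pos (show 3 ≤ (i.toNat : Int) ∧ (i.toNat : Int) ≤ i ∧ (i - (i.toNat : Int)) % 2 = 0 by omega)]
    · by_cases hc : 3 ≤ (j : Int) ∧ (j : Int) ≤ i - 2 ∧ (i - 2 - (j : Int)) % 2 = 0
      · rw [if_pos hc, getD_set_ne _ _ _ _ (by omega), getD_set_ne _ _ _ _ (by omega),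
          if_pos (show 3 ≤ (j : Int) ∧ (j : Int) ≤ i ∧ (i - (j : Int)) % 2 = 0 by omega)]
      · rw [if_neg hc, getD_set_ne _ _ _ _ (by omega),
          if_neg (show ¬(3 ≤ (j : Int) ∧ (j : Int) ≤ i ∧ (i - (j : Int)) % 2 = 0) by omega)]
  | case2 row i h =>
    rw [if_neg (by omega)]

theorem change_to_relative_eq_alt (row : List Int) :
    change_to_relative row = change_to_relative_alt row := by
  unfold change_to_relative change_to_relative_alt
  have hmod : PySem.Int.mod ((row.length : Int) - 2) 2 = ((row.length : Int) - 2) % 2 :=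
    PySem.Int.mod_eq_emod_of_pos (by norm_num)
  simp only [hmod]
  by_cases hpar : ((row.length : Int) - 2) % 2 = 0
  · rw [if_pos (by simpa using hpar)]
    apply List.ext_getElem (by rw [aLoop_length, bLoop_length])
    intro j h1 h2
    have hj : j < row.length := by rw [aLoop_length] at h1; exact h1
    rw [← List.getD_eq_getElem _ 0 h1, ← List.getD_eq_getElem _ 0 h2,
      aLoop_getD _ _ _ _ hj, bLoop_getD _ _ _ hj]
    split_ifs <;> first | rfl | (exfalso; omega) | simp
  · rw [if_neg (by simpa using hpar)]
    apply List.ext_getElem (by rw [aLoop_length, bLoop_length])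
    intro j h1 h2
    have hj : j < row.length := by rw [aLoop_length] at h1; exact h1
    rw [← List.getD_eq_getElem _ 0 h1, ← List.getD_eq_getElem _ 0 h2,
      aLoop_getD _ _ _ _ hj, bLoop_getD _ _ _ hj]
    split_ifs <;> first | rfl | (exfalso; omega) | simp

-- ===== VERDICT (by name: the statement is the Claim_ definition above) =====
theorem change_to_relative_spec : Claim_equal_change_to_relative := by
  intro row _
  unfold Spec_change_to_relative
  exact change_to_relative_eq_alt row
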